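-- pv_equiv track=rewrite | github.com/srijitravi94/Search-Engine | PHASE 1/TASK 2/PSEUDO_RELEVANCE_FEEDBACK/PseudoRelevanceFeedbackBM25.py | queryFrequency
-- ===== SOURCE A (Python) =====
-- def queryFrequency(query, invertedIndex):
--     queryFreq = {}
--     for term in query:
--         if term in queryFreq.keys():
--             queryFreq[term] += 1
--         else:
--             queryFreq[term] = 1
--     for term in invertedIndex:
--         if term not in queryFreq.keys():
--             queryFreq[term] = 0
--     return queryFreq
-- ===== SOURCE B (Python) =====
-- def queryFrequency(query, invertedIndex):
--     queryFreq = {}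
--     for term in query + list(invertedIndex):
--         if term not in queryFreq:
--             queryFreq[term] = query.count(term)
--     return queryFreq
-- ===== Notes on version B (the rewrite author's own statement) =====
-- stated objective: simpler
-- what changed: A threads a mutable counter through two membership-branching loops (increment per query occurrence, then zero-fill index keys); B makes one loop over query + list(invertedIndex) and, at each first occurrence of a term, stores query.count(term) directly, so no incremental counting or zero branch exists at all.
import Mathlib
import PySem

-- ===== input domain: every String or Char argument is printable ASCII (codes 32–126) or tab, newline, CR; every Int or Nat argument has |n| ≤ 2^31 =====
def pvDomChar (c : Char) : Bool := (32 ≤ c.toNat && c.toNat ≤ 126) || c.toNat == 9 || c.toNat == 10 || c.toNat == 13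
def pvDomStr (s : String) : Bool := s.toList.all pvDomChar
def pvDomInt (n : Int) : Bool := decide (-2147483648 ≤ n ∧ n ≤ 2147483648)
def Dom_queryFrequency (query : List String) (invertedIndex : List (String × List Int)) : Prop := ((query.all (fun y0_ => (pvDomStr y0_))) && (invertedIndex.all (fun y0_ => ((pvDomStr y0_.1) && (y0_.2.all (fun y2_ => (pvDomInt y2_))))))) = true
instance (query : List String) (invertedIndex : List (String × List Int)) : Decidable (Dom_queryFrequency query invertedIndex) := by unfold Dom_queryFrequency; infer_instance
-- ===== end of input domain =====

-- B replaces A's incremental counter (two membership-branching loops mutating one dict) by a single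
-- loop over query + index keys that inserts query.count(term) at each first occurrence: simpler, one pass, no increments.


-- ===== PORT A =====
def queryFrequency (query : List String) (invertedIndex : List (String × List Int)) : List (String × Int) :=
  -- queryFreq = {}; for term in query: if term in queryFreq.keys(): +=1 else: =1
  let d1 : PySem.Dict String Int :=
    query.foldl (fun d t => if d.contains t then d.insert t (d.getD t 0 + 1) else d.insert t 1)
      PySem.Dict.empty
  -- for term in invertedIndex (dict keys): if term not in queryFreq.keys(): =0
  let d2 : PySem.Dict String Int :=
    invertedIndex.foldl (fun d p => if d.contains p.1 then d else d.insert p.1 0) d1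
  d2.items

-- ===== PORT B =====
def queryFrequency_alt (query : List String) (invertedIndex : List (String × List Int)) : List (String × Int) :=
  -- queryFreq = {}; for term in query + list(invertedIndex):
  --   if term not in queryFreq: queryFreq[term] = query.count(term)
  let d : PySem.Dict String Int :=
    (query ++ invertedIndex.map Prod.fst).foldl
      (fun d t => if d.contains t then d else d.insert t ((PySem.List.count query t : Nat) : Int))
      PySem.Dict.empty
  d.items

-- ===== PRECONDITION & SPEC =====
def Spec_queryFrequency (query : List String) (invertedIndex : List (String × List Int)) (out : List (String × Int)) : Prop := out = queryFrequency_alt query invertedIndex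
instance (query : List String) (invertedIndex : List (String × List Int)) (out : List (String × Int)) : Decidable (Spec_queryFrequency query invertedIndex out) := by unfold Spec_queryFrequency; infer_instance

-- ===== CLAIM (what is proved, stated in full; the proofs are below) =====
def Claim_equal_queryFrequency : Prop := ∀ (query : List String) (invertedIndex : List (String × List Int)), Dom_queryFrequency query invertedIndex → Spec_queryFrequency query invertedIndex (queryFrequency query invertedIndex)

-- ===== LEMMAS AND PROOFS =====

-- the items appended by an insert-if-absent loop: first occurrences of L not in ks, paired with v
def ffill (v : String → Int) (L : List String) (ks : List String) : List (String × Int) :=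
  match L with
  | [] => []
  | t :: L => if t ∈ ks then ffill v L ks else (t, v t) :: ffill v L (ks ++ [t])

lemma ffill_congr (v w : String → Int) (L ks ks' : List String)
    (hks : ∀ k, k ∈ ks ↔ k ∈ ks') (hv : ∀ t, t ∉ ks → v t = w t) :
    ffill v L ks = ffill w L ks' := by
  induction L generalizing ks ks' with
  | nil => rfl
  | cons t L ih =>
    by_cases ht : t ∈ ks
    · rw [ffill, if_pos ht, ffill, if_pos ((hks t).mp ht), ih ks ks' hks hv]
    · rw [ffill, if_neg ht, ffill, if_neg (fun hx => ht ((hks t).mpr hx)), hv t ht,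
        ih (ks ++ [t]) (ks' ++ [t]) (by intro k; simp [hks k])
          (by intro s hs; exact hv s (fun hx => hs (by simp [hx])))]

-- an insert-if-absent fold appends exactly the ffill suffix to the items
lemma foldl_ins_items (v : String → Int) (L : List String) (d : PySem.Dict String Int)
    (hnd : d.keys.Nodup) :
    (L.foldl (fun d t => if d.contains t then d else d.insert t (v t)) d).items
      = d.items ++ ffill v L d.keys := by
  induction L generalizing d with
  | nil => simp [ffill]
  | cons t L ih =>
    simp only [List.foldl_cons]
    by_cases hc : d.contains t = true
    · rw [if_pos hc, ih d hnd, ffill,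
        if_pos (by rwa [PySem.Dict.contains_eq_decide_mem_keys, decide_eq_true_eq] at hc)]
    · have hc' : d.contains t = false := by simpa using hc
      have hmem : t ∉ d.keys := by
        rw [PySem.Dict.contains_eq_decide_mem_keys] at hc'; simpa using hc'
      rw [if_neg hc, ffill, if_neg hmem,
        ih (d.insert t (v t))
          (by rw [PySem.Dict.keys_insert_of_not_contains d (v t) hc']
              simp [List.nodup_append]
              exact ⟨hnd, fun a ha he => hmem (he ▸ ha)⟩),
        PySem.Dict.items_insert_of_not_contains d (v t) hc',
        PySem.Dict.keys_insert_of_not_contains d (v t) hc']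
      simp

lemma mem_iff_contains (s : List String) (t : String) : PySem.Set.contains s t = true ↔ t ∈ s := by
  simp [PySem.Set.contains]

lemma foldl_add_prefix (L s : List String) : ∃ r, L.foldl PySem.Set.add s = s ++ r := by
  induction L generalizing s with
  | nil => exact ⟨[], by simp⟩
  | cons t L ih =>
    simp only [List.foldl_cons]
    by_cases ht : PySem.Set.contains s t
    · have : PySem.Set.add s t = s := by simp only [PySem.Set.add, ht, if_true]
      rw [this]; exact ih s
    · have : PySem.Set.add s t = s ++ [t] := by
        simp only [PySem.Set.add]; rw [if_neg ht]
      rw [this]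
      rcases ih (s ++ [t]) with ⟨r, hr⟩
      exact ⟨[t] ++ r, by rw [hr]; simp⟩

-- the keys/values appended by ffill are exactly the new elements added by the Set fold, paired with v
lemma ffill_set (v : String → Int) (L s : List String) :
    ffill v L s = ((L.foldl PySem.Set.add s).drop s.length).map (fun k => (k, v k)) := by
  induction L generalizing s with
  | nil => simp [ffill]
  | cons t L ih =>
    simp only [List.foldl_cons]
    by_cases ht : t ∈ s
    · have hadd : PySem.Set.add s t = s := by
        simp [PySem.Set.add, PySem.Set.contains, ht]
      rw [ffill, if_pos ht, hadd, ih s]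
    · have ht' : ¬ PySem.Set.contains s t = true := fun hx => ht ((mem_iff_contains s t).mp hx)
      have hadd : PySem.Set.add s t = s ++ [t] := by
        simp only [PySem.Set.add]; rw [if_neg ht']
      rw [ffill, if_neg ht, hadd, ih (s ++ [t])]
      rcases foldl_add_prefix L (s ++ [t]) with ⟨r, hr⟩
      rw [hr]
      have h1 : ((s ++ [t]) ++ r).drop s.length = [t] ++ r := by
        rw [List.append_assoc, List.drop_left]
      have h2 : ((s ++ [t]) ++ r).drop (s ++ [t]).length = r := List.drop_left
      rw [h1, h2]
      simp

lemma ffill_nil (v : String → Int) (L : List String) :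
    ffill v L [] = (PySem.Set.ofList L).map (fun k => (k, v k)) := by
  rw [ffill_set v L [], PySem.Set.ofList_eq_foldl]
  simp

lemma ffill_append (v : String → Int) (L1 L2 ks : List String) :
    ffill v (L1 ++ L2) ks
      = ffill v L1 ks ++ ffill v L2 (ks ++ (ffill v L1 ks).map Prod.fst) := by
  induction L1 generalizing ks with
  | nil => simp [ffill]
  | cons t L1 ih =>
    by_cases ht : t ∈ ks
    · rw [List.cons_append, ffill, if_pos ht, ffill, if_pos ht, ih ks]
    · rw [List.cons_append, ffill, if_neg ht, ffill, if_neg ht, ih (ks ++ [t])]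
      simp only [List.map_cons, List.cons_append]
      congr 1
      congr 1
      exact ffill_congr v v L2 _ _ (by intro k; simp) (fun _ _ => rfl)

-- A's first loop is the counter
lemma loopA_counter (query : List String) :
    query.foldl (fun d t => if d.contains t then d.insert t (d.getD t 0 + 1) else d.insert t 1)
      PySem.Dict.empty = PySem.Dict.counter query := by
  rw [← PySem.Dict.foldl_insert_getD_add_one_eq_counter]
  have hfun : (fun (d : PySem.Dict String Int) t =>
      if d.contains t then d.insert t (d.getD t 0 + 1) else d.insert t 1)
      = fun d x => d.insert x (d.getD x 0 + 1) := by
    funext d t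
    by_cases hc : d.contains t = true
    · rw [if_pos hc]
    · have hc' : d.contains t = false := by simpa using hc
      rw [if_neg hc, PySem.Dict.getD_of_not_contains d 0 hc']
      norm_num
  rw [hfun]

-- ===== VERDICT (by name: the statement is the Claim_ definition above) =====
theorem queryFrequency_spec : Claim_equal_queryFrequency := by
  intro query ii _
  show queryFrequency query ii = queryFrequency_alt query ii
  simp only [queryFrequency, queryFrequency_alt]
  set v : String → Int := fun t => ((PySem.List.count query t : Nat) : Int) with hv
  set M : List String := ii.map Prod.fst with hM
  -- A side
  rw [loopA_counter]
  have hA2 : ii.foldl (fun d p => if d.contains p.1 then d else d.insert p.1 0)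
      (PySem.Dict.counter query)
      = M.foldl (fun d t => if d.contains t then d else d.insert t ((fun _ => (0:Int)) t))
          (PySem.Dict.counter query) := by
    rw [hM, List.foldl_map]
  rw [hA2, foldl_ins_items (fun _ => (0:Int)) M (PySem.Dict.counter query)
      (PySem.Dict.nodup_keys_counter query)]
  -- B side
  rw [show (fun (d : PySem.Dict String Int) t =>
        if d.contains t then d else d.insert t ((PySem.List.count query t : Nat) : Int))
      = (fun d t => if d.contains t then d else d.insert t (v t)) from rfl,
    foldl_ins_items v (query ++ M) PySem.Dict.empty (by exact List.nodup_nil)]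
  have hemp : ((PySem.Dict.empty : PySem.Dict String Int).items : List (String × Int)) = [] := rfl
  have hkeys0 : ((PySem.Dict.empty : PySem.Dict String Int).keys : List String) = [] := rfl
  rw [hemp, hkeys0, List.nil_append, ffill_append v query M []]
  have hnil : ffill v query [] = (PySem.Set.ofList query).map (fun k => (k, v k)) :=
    ffill_nil v query
  have hfst : (ffill v query []).map Prod.fst = PySem.Set.ofList query := by
    have hid : (Prod.fst ∘ fun k : String => (k, v k)) = id := by funext k; rfl
    rw [hnil, List.map_map, hid, List.map_id]
  rw [List.nil_append, hfst, hnil,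
    PySem.Dict.items_counter query, PySem.Dict.keys_counter query]
  have hval : (fun k => (k, v k)) = (fun k => (k, (List.count k query : Int))) := by
    funext k; rw [hv]; simp [PySem.List.count_eq]
  rw [hval]
  congr 1
  refine ffill_congr (fun _ => (0:Int)) v M _ _ (fun k => Iff.rfl) ?_
  intro t ht
  rw [PySem.Set.mem_ofList] at ht
  simp [hv, PySem.List.count_eq, List.count_eq_zero.mpr ht]
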